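-- pv_equiv track=rewrite | github.com/Salman1717/hirematch-backend | app/services/parser_job.py | extract_sections_from_job
-- ===== SOURCE A (Python) =====
-- from typing import Dict, List, Any
--
-- def extract_sections_from_job(text: str) -> Dict[str, str]:
--     """
--     Heuristic splitting of job description into Responsibilities / Requirements / Others
--     Look for headings like 'Responsibilities', 'Requirements', 'Skills', 'What you'll do'
--     """
--     lines = text.splitlines()
--     headings = []
--     for idx, ln in enumerate(lines):
--         ln_low = ln.lower().strip()
--         if any(h in ln_low for h in ["responsibil", "requirement", "qualification", "skill", "what you'll", "what you will", "you will", "you are"]):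
--             headings.append((idx, ln.strip()))
--
--     if not headings:
--         # fallback: try to split by blank lines into paragraphs
--         paras = [p.strip() for p in text.split("\n\n") if p.strip()]
--         return {"description": " ".join(paras)}
--
--     sections = {}
--     for i, (pos, hdr) in enumerate(headings):
--         start = pos + 1
--         end = headings[i+1][0] if i+1 < len(headings) else len(lines)
--         content = " ".join(lines[start:end]).strip()
--         sections[hdr] = content
--     return sections
-- ===== SOURCE B (Python) =====
-- _KEYWORDS = ["responsibil", "requirement", "qualification", "skill",
--              "what you'll", "what you will", "you will", "you are"]
--
-- def _is_heading(line):
--     low = line.lower().strip()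
--     return any(h in low for h in _KEYWORDS)
--
-- def _skip(lines, i):
--     """Index of the first heading line at or after i (len(lines) if none)."""
--     while i < len(lines) and not _is_heading(lines[i]):
--         i += 1
--     return i
--
-- def extract_sections_from_job(text: str):
--     """Single forward sweep with two cursors: jump to the next heading, take the
--     run of lines up to the following heading as its content."""
--     lines = text.splitlines()
--     i = _skip(lines, 0)
--     if i == len(lines):
--         paras = [p.strip() for p in text.split("\n\n") if p.strip()]
--         return {"description": " ".join(paras)}
--     sections = {}
--     while i < len(lines):
--         j = _skip(lines, i + 1)
--         sections[lines[i].strip()] = " ".join(lines[i + 1:j]).strip()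
--         i = j
--     return sections
-- ===== Notes on version B (the rewrite author's own statement) =====
-- stated objective: simpler
-- what changed: B replaces A's two-pass scheme (collect all (index, heading) pairs, then slice the line list by index arithmetic between consecutive headings) with a single forward sweep using two cursors that jump from one heading to the next and take the run of lines in between as content.
import Mathlib
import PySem

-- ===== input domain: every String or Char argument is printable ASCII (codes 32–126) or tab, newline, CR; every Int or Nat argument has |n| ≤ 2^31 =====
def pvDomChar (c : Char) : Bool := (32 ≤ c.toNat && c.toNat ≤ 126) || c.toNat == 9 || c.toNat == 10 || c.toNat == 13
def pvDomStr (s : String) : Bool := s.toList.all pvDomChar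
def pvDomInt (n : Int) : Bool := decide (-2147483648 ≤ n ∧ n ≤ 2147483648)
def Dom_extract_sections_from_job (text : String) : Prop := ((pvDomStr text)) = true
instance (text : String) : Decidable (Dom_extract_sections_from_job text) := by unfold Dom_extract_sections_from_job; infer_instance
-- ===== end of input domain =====

-- B replaces A's two-pass scheme (collect all (index, heading) pairs, then slice between
-- consecutive indices) by one forward sweep with two cursors; objective: simpler, same cost.

-- ===== PORT A =====
def pvKw : List String :=
  ["responsibil", "requirement", "qualification", "skill",
   "what you'll", "what you will", "you will", "you are"]

def extract_sections_from_job (text : String) : List (String × String) :=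
  let lines := PySem.Str.splitlines text
  let headings := (PySem.List.enumerate lines 0).foldl
    (fun acc q =>
      if pvKw.any (fun h => PySem.Str.isIn h (PySem.Str.strip (PySem.Str.lower q.2))) then
        acc ++ [(q.1, PySem.Str.strip q.2)]
      else acc) []
  if headings.isEmpty then
    let paras := (((PySem.Str.split? text "\n\n").getD []).filter
        (fun p => !(PySem.Str.strip p == ""))).map PySem.Str.strip
    [("description", PySem.Str.join " " paras)]
  else
    let sections := (PySem.List.enumerate headings 0).foldl
      (fun d q =>
        let start := q.2.1 + 1
        let fin := if q.1 + 1 < (headings.length : Int)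
                   then (PySem.List.pyGetD headings (q.1 + 1) (0, "")).1
                   else (lines.length : Int)
        let content := PySem.Str.strip (PySem.Str.join " "
            (PySem.List.slice lines (some start) (some fin)))
        d.insert q.2.2 content) PySem.Dict.empty
    sections.items

-- ===== PORT B =====
def pvIsHeading (ln : String) : Bool :=
  pvKw.any (fun h => PySem.Str.isIn h (PySem.Str.strip (PySem.Str.lower ln)))

def pvSkip (lines : List String) (i : Nat) : Nat :=
  if h : i < lines.length then
    if pvIsHeading lines[i] then i else pvSkip lines (i + 1)
  else i
termination_by lines.length - i

-- cited by pvBuild's decreasing_by, hence above the claim block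
theorem pvSkip_ge (lines : List String) : ∀ i, i ≤ pvSkip lines i := by
  intro i
  induction hn : lines.length - i using Nat.strong_induction_on generalizing i with
  | _ n ih =>
      rw [pvSkip]
      by_cases h : i < lines.length
      · rw [dif_pos h]
        by_cases hp : pvIsHeading lines[i] = true
        · rw [if_pos hp]
        · rw [if_neg hp]
          have := ih (lines.length - (i + 1)) (by omega) (i + 1) rfl
          omega
      · rw [dif_neg h]

def pvBuild (lines : List String) (i : Nat) (d : PySem.Dict String String) :
    PySem.Dict String String :=
  if h : i < lines.length then
    let j := pvSkip lines (i + 1)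
    pvBuild lines j (d.insert (PySem.Str.strip (PySem.List.pyGetD lines (i : Int) ""))
      (PySem.Str.strip (PySem.Str.join " "
        (PySem.List.slice lines (some ((i + 1 : Nat) : Int)) (some (j : Int))))))
  else d
termination_by lines.length - i
decreasing_by
  have := pvSkip_ge lines (i + 1)
  omega

def extract_sections_from_job_alt (text : String) : List (String × String) :=
  let lines := PySem.Str.splitlines text
  let i := pvSkip lines 0
  if i = lines.length then
    let paras := (((PySem.Str.split? text "\n\n").getD []).filter
        (fun p => !(PySem.Str.strip p == ""))).map PySem.Str.strip
    [("description", PySem.Str.join " " paras)]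
  else
    (pvBuild lines i PySem.Dict.empty).items

-- ===== PRECONDITION & SPEC =====
def Spec_extract_sections_from_job (text : String) (out : List (String × String)) : Prop := out = extract_sections_from_job_alt text
instance (text : String) (out : List (String × String)) : Decidable (Spec_extract_sections_from_job text out) := by unfold Spec_extract_sections_from_job; infer_instance

-- ===== CLAIM (what is proved, stated in full; the proofs are below) =====
def Claim_equal_extract_sections_from_job : Prop := ∀ (text : String), Dom_extract_sections_from_job text → Spec_extract_sections_from_job text (extract_sections_from_job text)

-- ===== LEMMAS AND PROOFS =====

-- the (index, stripped-line) heading list A builds, as a recursion with an offset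
def pvHl (s : Int) : List String → List (Int × String)
  | [] => []
  | l :: t => if pvIsHeading l then (s, PySem.Str.strip l) :: pvHl (s + 1) t else pvHl (s + 1) t

-- A's second loop as a recursion over the heading list (lines fixed)
def pvAsec (lines : List String) : List (Int × String) → PySem.Dict String String → PySem.Dict String String
  | [], d => d
  | (pos, hdr) :: t, d =>
      let fin := match t.head? with
                 | some q => q.1
                 | none => (lines.length : Int)
      pvAsec lines t (d.insert hdr
        (PySem.Str.strip (PySem.Str.join " " (PySem.List.slice lines (some (pos + 1)) (some fin)))))

-- what both programs compute, section by section, on the suffix after the next heading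
def pvGo : List String → PySem.Dict String String → PySem.Dict String String
  | [], d => d
  | h :: body, d =>
      pvGo (body.dropWhile (fun l => !pvIsHeading l))
        (d.insert (PySem.Str.strip h)
          (PySem.Str.strip (PySem.Str.join " " (body.takeWhile (fun l => !pvIsHeading l)))))
termination_by ls _ => ls.length
decreasing_by
  have := List.length_dropWhile_le (p := fun l => !pvIsHeading l) (l := body)
  simpa using Nat.lt_succ_of_le this

theorem pvFoldHead (ls : List String) : ∀ (s : Int) (acc : List (Int × String)),
    (PySem.List.enumerate ls s).foldl
      (fun acc q =>
        if pvKw.any (fun h => PySem.Str.isIn h (PySem.Str.strip (PySem.Str.lower q.2))) then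
          acc ++ [(q.1, PySem.Str.strip q.2)]
        else acc) acc = acc ++ pvHl s ls := by
  induction ls with
  | nil => intro s acc; simp [PySem.List.enumerate_nil, pvHl]
  | cons l t ih =>
      intro s acc
      rw [PySem.List.enumerate_cons, List.foldl_cons, pvHl]
      have h : (pvKw.any fun h => PySem.Str.isIn h (PySem.Str.strip (PySem.Str.lower l))) = pvIsHeading l := rfl
      by_cases hb : pvIsHeading l = true
      · simp only [h, hb, if_true, ih]
        simp
      · rw [Bool.not_eq_true] at hb
        simp only [h, hb, if_false, Bool.false_eq_true, ih]

theorem pvHl_append (as bs : List String) : ∀ s : Int,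
    pvHl s (as ++ bs) = pvHl s as ++ pvHl (s + as.length) bs := by
  induction as with
  | nil => intro s; simp [pvHl]
  | cons a t ih =>
      intro s
      by_cases h : pvIsHeading a = true
      · simp only [List.cons_append, pvHl, h, if_true, ih (s + 1), List.length_cons]
        norm_num; ring_nf
      · rw [Bool.not_eq_true] at h
        simp only [List.cons_append, pvHl, h, Bool.false_eq_true, if_false, ih (s + 1), List.length_cons]
        norm_num; ring_nf

theorem pvHl_nil_of_none (ls : List String) (h : ∀ l ∈ ls, pvIsHeading l = false) (s : Int) :
    pvHl s ls = [] := by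
  induction ls generalizing s with
  | nil => rfl
  | cons a t ih => simp [pvHl, h a (by simp), ih (fun l hl => h l (by simp [hl]))]

theorem pvHl_takeWhile (ls : List String) (s : Int) :
    pvHl s (ls.takeWhile (fun l => !pvIsHeading l)) = [] := by
  apply pvHl_nil_of_none
  intro l hl
  have := List.mem_takeWhile_imp hl
  simpa using this

theorem pvFold_eq_asec (lines : List String) (hs : List (Int × String)) :
    ∀ (suf : List (Int × String)) (j : Nat), hs.drop j = suf → ∀ d,
    (PySem.List.enumerate suf (j : Int)).foldl
      (fun d q =>
        d.insert q.2.2 (PySem.Str.strip (PySem.Str.join " "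
          (PySem.List.slice lines (some (q.2.1 + 1))
            (some (if q.1 + 1 < (hs.length : Int)
                   then (PySem.List.pyGetD hs (q.1 + 1) (0, "")).1
                   else (lines.length : Int))))))) d = pvAsec lines suf d := by
  intro suf
  induction suf with
  | nil => intro j hj d; simp [PySem.List.enumerate_nil, pvAsec]
  | cons q t ih =>
      intro j hj d
      rw [PySem.List.enumerate_cons, List.foldl_cons]
      obtain ⟨pos, hdr⟩ := q
      have hjlt : j < hs.length := by
        by_contra hge
        rw [List.drop_eq_nil_of_le (by omega)] at hj
        exact (List.cons_ne_nil _ _) hj.symm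
      have ht : hs.drop (j + 1) = t := by
        have h2 : List.drop 1 (List.drop j hs) = List.drop (j + 1) hs := List.drop_drop
        rw [hj] at h2
        exact h2.symm
      have hfin : (if (j : Int) + 1 < (hs.length : Int)
                   then (PySem.List.pyGetD hs ((j : Int) + 1) (0, "")).1
                   else (lines.length : Int))
                = (match t.head? with
                   | some q => q.1
                   | none => (lines.length : Int)) := by
        by_cases hc : j + 1 < hs.length
        · rw [if_pos (by exact_mod_cast hc)]
          have : hs[j+1]? = t.head? := by
            rw [← ht, List.head?_drop]
          have hsome : t.head? = some (hs[j+1]'hc) := by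
            rw [← this, List.getElem?_eq_getElem hc]
          rw [hsome]
          have : PySem.List.pyGetD hs ((j : Int) + 1) (0, "") = hs[j+1]'hc := by
            have := PySem.List.pyGetD_natCast (xs := hs) (n := j + 1) (d := ((0 : Int), ""))
            push_cast at this ⊢
            rw [this, List.getD_eq_getElem?_getD, List.getElem?_eq_getElem hc]
            rfl
          rw [this]
        · rw [if_neg (by exact_mod_cast hc)]
          have : t.head? = none := by
            rw [← ht, List.head?_drop]
            exact List.getElem?_eq_none (by omega)
          rw [this]
      simp only [hfin]
      have : ((j : Int) + 1) = ((j + 1 : Nat) : Int) := by push_cast; ring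
      rw [this, ih (j + 1) ht]
      rfl

theorem pvFold_eq_asec0 (lines : List String) (hs : List (Int × String)) (d : PySem.Dict String String) :
    (PySem.List.enumerate hs (0 : Int)).foldl
      (fun d q =>
        d.insert q.2.2 (PySem.Str.strip (PySem.Str.join " "
          (PySem.List.slice lines (some (q.2.1 + 1))
            (some (if q.1 + 1 < (hs.length : Int)
                   then (PySem.List.pyGetD hs (q.1 + 1) (0, "")).1
                   else (lines.length : Int))))))) d = pvAsec lines hs d := by
  have := pvFold_eq_asec lines hs hs 0 List.drop_zero d
  simpa using this

theorem pvHeadDrop {p : String → Bool} {l : List String} {x : String} {xs : List String}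
    (hd : l.dropWhile p = x :: xs) : p x = false := by
  induction l with
  | nil => simp at hd
  | cons a t ih =>
      rw [List.dropWhile_cons] at hd
      by_cases ha : p a = true
      · simp [ha] at hd
        exact ih hd
      · rw [Bool.not_eq_true] at ha
        simp [ha] at hd
        obtain ⟨h1, h2⟩ := hd
        subst h1
        exact ha

theorem pvDW_idem {p : String → Bool} (l : List String) :
    (l.dropWhile p).dropWhile p = l.dropWhile p := by
  rcases hdw : l.dropWhile p with _ | ⟨x, xs⟩
  · rfl
  · rw [List.dropWhile_cons, pvHeadDrop hdw]
    simp

theorem pvMainAux (lines : List String) : ∀ (n : Nat) (suf pre : List String),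
    suf.length ≤ n → lines = pre ++ suf → ∀ d,
    pvAsec lines (pvHl (pre.length : Int) suf) d
      = pvGo (suf.dropWhile (fun l => !pvIsHeading l)) d := by
  intro n
  induction n with
  | zero =>
      intro suf pre hlen _ d
      have : suf = [] := List.eq_nil_of_length_eq_zero (by omega)
      subst this
      simp [pvHl, pvAsec, pvGo]
  | succ n ih =>
      intro suf pre hlen heq d
      rcases hdw : suf.dropWhile (fun l => !pvIsHeading l) with _ | ⟨h, rest⟩
      · -- no heading in suf
        have hall : ∀ l ∈ suf, pvIsHeading l = false := by
          have := List.dropWhile_eq_nil_iff.mp hdw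
          intro l hl
          simpa using this l hl
        rw [pvHl_nil_of_none suf hall]
        simp [pvAsec, pvGo]
      · -- suf = tw ++ h :: rest, h a heading
        have hsplit : suf = suf.takeWhile (fun l => !pvIsHeading l) ++ h :: rest := by
          rw [← hdw, List.takeWhile_append_dropWhile]
        have hh : pvIsHeading h = true := by
          have := pvHeadDrop hdw
          simpa using this
        set tw := suf.takeWhile (fun l => !pvIsHeading l) with htw
        have hlines : lines = (pre ++ tw ++ [h]) ++ rest := by
          rw [heq, hsplit]; simp
        have hpre1 : ((pre ++ tw ++ [h]).length : Int) = (pre.length : Int) + tw.length + 1 := by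
          simp; omega
        have hdropLines : lines.drop (pre.length + tw.length + 1) = rest := by
          have hlen3 : (pre ++ tw ++ [h]).length = pre.length + tw.length + 1 := by simp [Nat.add_assoc]
          rw [hlines, ← hlen3]
          exact List.drop_left
        -- the content slice equals the takeWhile run
        have hcontent : PySem.List.slice lines
            (some ((pre.length : Int) + tw.length + 1))
            (some (match (pvHl ((pre.length : Int) + tw.length + 1) rest).head? with
                   | some q => q.1
                   | none => (lines.length : Int)))
            = rest.takeWhile (fun l => !pvIsHeading l) := by
          rcases hdw2 : rest.dropWhile (fun l => !pvIsHeading l) with _ | ⟨h2, rest2⟩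
          · -- rest has no further heading
            have hall2 : ∀ l ∈ rest, pvIsHeading l = false := by
              have := List.dropWhile_eq_nil_iff.mp hdw2
              intro l hl; simpa using this l hl
            rw [pvHl_nil_of_none rest hall2]
            have htk : rest.takeWhile (fun l => !pvIsHeading l) = rest := by
              have h3 := List.takeWhile_append_dropWhile (p := fun l => !pvIsHeading l) (l := rest)
              rw [hdw2, List.append_nil] at h3
              exact h3
            have hc1 : ((pre.length : Int) + tw.length + 1) = ((pre.length + tw.length + 1 : Nat) : Int) := by push_cast; ring
            rw [hc1]
            show PySem.List.slice lines (some ((pre.length + tw.length + 1 : Nat) : Int)) (some ((lines.length : Nat) : Int)) = _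
            rw [PySem.List.slice_natCast, hdropLines, htk]
            have : lines.length - (pre.length + tw.length + 1) = rest.length := by
              have := congrArg List.length hlines
              simp at this; omega
            rw [this, List.take_length]
          · -- next heading h2 inside rest
            have hsplit2 : rest = rest.takeWhile (fun l => !pvIsHeading l) ++ h2 :: rest2 := by
              rw [← hdw2, List.takeWhile_append_dropWhile]
            have hh2 : pvIsHeading h2 = true := by
              have := pvHeadDrop hdw2
              simpa using this
            set tw2 := rest.takeWhile (fun l => !pvIsHeading l) with htw2
            rw [hsplit2, pvHl_append, pvHl_takeWhile, List.nil_append,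
                show pvHl ((pre.length : Int) + tw.length + 1 + tw2.length) (h2 :: rest2)
                  = (((pre.length : Int) + tw.length + 1 + tw2.length), PySem.Str.strip h2)
                    :: pvHl ((pre.length : Int) + tw.length + 1 + tw2.length + 1) rest2 by rw [pvHl, if_pos hh2]]
            rw [List.head?_cons]
            have hc1 : ((pre.length : Int) + tw.length + 1) = ((pre.length + tw.length + 1 : Nat) : Int) := by push_cast; ring
            have hc2 : ((pre.length : Int) + tw.length + 1 + tw2.length)
                = ((pre.length + tw.length + 1 : Nat) : Int) + ((tw2.length : Nat) : Int) := by push_cast; ring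
            rw [hc2, hc1, PySem.List.slice_natCast_add, hdropLines]
            have hpref : tw2 <+: rest := List.takeWhile_prefix _
            exact (List.prefix_iff_eq_take.mp hpref).symm
        -- unfold pvHl over the decomposition
        rw [hsplit, pvHl_append, pvHl_takeWhile, List.nil_append]
        rw [show pvHl ((pre.length : Int) + tw.length) (h :: rest)
              = (((pre.length : Int) + tw.length), PySem.Str.strip h)
                :: pvHl ((pre.length : Int) + tw.length + 1) rest by rw [pvHl, if_pos hh]]
        rw [pvAsec]
        rw [hcontent]
        rw [pvGo]
        -- IH for rest
        have hrest : rest.length ≤ n := by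
          have := congrArg List.length hsplit
          simp at this; omega
        have hihr := ih rest (pre ++ tw ++ [h]) hrest hlines
        rw [hpre1] at hihr
        exact hihr _

theorem pvHl_nil_iff (ls : List String) : ∀ s : Int,
    (pvHl s ls = [] ↔ ls.dropWhile (fun l => !pvIsHeading l) = []) := by
  induction ls with
  | nil => intro s; simp [pvHl]
  | cons a t ih =>
      intro s
      by_cases h : pvIsHeading a = true
      · simp [pvHl, h]
      · rw [Bool.not_eq_true] at h
        simp [pvHl, h, ih (s + 1)]

theorem pvSkip_le (lines : List String) : ∀ i, i ≤ lines.length → pvSkip lines i ≤ lines.length := by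
  intro i
  induction hn : lines.length - i using Nat.strong_induction_on generalizing i with
  | _ n ih =>
      intro hle
      rw [pvSkip]
      by_cases h : i < lines.length
      · rw [dif_pos h]
        by_cases hp : pvIsHeading lines[i] = true
        · rw [if_pos hp]; omega
        · rw [if_neg hp]
          exact ih (lines.length - (i + 1)) (by omega) (i + 1) rfl (by omega)
      · rw [dif_neg h]; omega

theorem pvSkip_drop (lines : List String) : ∀ i,
    lines.drop (pvSkip lines i) = (lines.drop i).dropWhile (fun l => !pvIsHeading l) := by
  intro i
  induction hn : lines.length - i using Nat.strong_induction_on generalizing i with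
  | _ n ih =>
      rw [pvSkip]
      by_cases h : i < lines.length
      · have hcons : lines.drop i = lines[i] :: lines.drop (i + 1) := List.drop_eq_getElem_cons h
        rw [dif_pos h, hcons, List.dropWhile_cons]
        by_cases hp : pvIsHeading lines[i] = true
        · rw [if_pos hp, hp]
          simp [← hcons]
        · rw [Bool.not_eq_true] at hp
          rw [if_neg (by simp [hp]), hp]
          simp only [Bool.not_false, if_true]
          exact ih (lines.length - (i + 1)) (by omega) (i + 1) rfl
      · rw [dif_neg h, List.drop_eq_nil_of_le (by omega : lines.length ≤ i)]
        rfl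

theorem pvTake {p : String → Bool} (m : List String) (k : Nat) (hk : k ≤ m.length)
    (hdw : m.drop k = m.dropWhile p) : m.take k = m.takeWhile p := by
  have hlen : (m.takeWhile p).length = k := by
    have h1 := congrArg List.length (List.takeWhile_append_dropWhile (p := p) (l := m))
    rw [List.length_append, ← hdw, List.length_drop] at h1
    omega
  have hpref := List.takeWhile_prefix (p := p) (l := m)
  rw [List.prefix_iff_eq_take.mp hpref, hlen]

theorem pvBuild_eq_pvGo (lines : List String) : ∀ (n i : Nat) (d : PySem.Dict String String),
    lines.length - i ≤ n →
    lines.drop i = (lines.drop i).dropWhile (fun l => !pvIsHeading l) →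
    pvBuild lines i d = pvGo (lines.drop i) d := by
  intro n
  induction n with
  | zero =>
      intro i d hn _
      rw [pvBuild, dif_neg (by omega), List.drop_eq_nil_of_le (by omega), pvGo]
  | succ n ih =>
      intro i d hn hfix
      by_cases h : i < lines.length
      · have hcons : lines.drop i = lines[i] :: lines.drop (i + 1) := List.drop_eq_getElem_cons h
        have hp : pvIsHeading lines[i] = true := by
          by_contra hpf
          rw [Bool.not_eq_true] at hpf
          rw [hcons, List.dropWhile_cons, hpf] at hfix
          simp only [Bool.not_false, if_true] at hfix
          have hlen2 := congrArg List.length hfix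
          rw [List.length_cons] at hlen2
          have h2 := List.length_dropWhile_le (p := fun l => !pvIsHeading l) (l := lines.drop (i + 1))
          omega
        have hge : i + 1 ≤ pvSkip lines (i + 1) := pvSkip_ge lines (i + 1)
        have hle : pvSkip lines (i + 1) ≤ lines.length := pvSkip_le lines (i + 1) (by omega)
        have hdropj : lines.drop (pvSkip lines (i + 1))
            = (lines.drop (i + 1)).dropWhile (fun l => !pvIsHeading l) :=
          pvSkip_drop lines (i + 1)
        have hslice : PySem.List.slice lines (some ((i + 1 : Nat) : Int))
              (some ((pvSkip lines (i + 1) : Nat) : Int))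
            = (lines.drop (i + 1)).takeWhile (fun l => !pvIsHeading l) := by
          rw [PySem.List.slice_natCast]
          apply pvTake
          · rw [List.length_drop]; omega
          · rw [List.drop_drop, Nat.add_comm, Nat.sub_add_cancel hge]
            exact hdropj
        have hget : PySem.List.pyGetD lines (i : Int) "" = lines[i] := by
          have hg := PySem.List.pyGetD_natCast (xs := lines) (n := i) (d := "")
          rw [hg, List.getD_eq_getElem?_getD, List.getElem?_eq_getElem h]
          rfl
        rw [pvBuild, dif_pos h]
        simp only []
        rw [hslice, hget]
        rw [hcons, pvGo]
        rw [← hdropj]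
        refine ih (pvSkip lines (i + 1)) _ (by omega) ?_
        rw [hdropj]
        exact (pvDW_idem _).symm
      · rw [pvBuild, dif_neg h, List.drop_eq_nil_of_le (by omega), pvGo]

theorem pv_final (text : String) :
    extract_sections_from_job text = extract_sections_from_job_alt text := by
  unfold extract_sections_from_job extract_sections_from_job_alt
  simp only []
  rw [pvFoldHead]
  simp only [List.nil_append]
  set lines := PySem.Str.splitlines text with hl
  have hdrop0 : lines.drop (pvSkip lines 0) = lines.dropWhile (fun l => !pvIsHeading l) := by
    have := pvSkip_drop lines 0
    simpa using this
  have hle0 : pvSkip lines 0 ≤ lines.length := pvSkip_le lines 0 (Nat.zero_le _)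
  by_cases hnil : pvHl 0 lines = []
  · have hdw : lines.dropWhile (fun l => !pvIsHeading l) = [] := (pvHl_nil_iff lines 0).mp hnil
    have hi0 : pvSkip lines 0 = lines.length := by
      rw [hdw] at hdrop0
      have := congrArg List.length hdrop0
      simp at this
      omega
    rw [hnil, if_pos hi0]
    simp
  · have hdwne : lines.dropWhile (fun l => !pvIsHeading l) ≠ [] :=
      fun hc => hnil ((pvHl_nil_iff lines 0).mpr hc)
    have hi0 : pvSkip lines 0 ≠ lines.length := by
      intro hc
      apply hdwne
      rw [← hdrop0, hc]
      exact List.drop_length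
    rw [if_neg (by simpa using hnil), if_neg hi0]
    rw [pvFold_eq_asec0 lines (pvHl 0 lines) PySem.Dict.empty]
    have hA := pvMainAux lines lines.length lines [] le_rfl (by simp) PySem.Dict.empty
    simp only [List.length_nil, Nat.cast_zero] at hA
    rw [hA]
    rw [pvBuild_eq_pvGo lines lines.length (pvSkip lines 0) _ (by omega)
        (by rw [hdrop0]; exact (pvDW_idem _).symm)]
    rw [hdrop0]

-- ===== VERDICT (by name: the statement is the Claim_ definition above) =====
theorem extract_sections_from_job_spec : Claim_equal_extract_sections_from_job := by
  intro text _
  unfold Spec_extract_sections_from_job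
  exact pv_final text
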